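-- pv_equiv track=rewrite | github.com/Nerja/EDAN20 | Lab3/baseline.py | count_pos_chunk
-- ===== SOURCE A (Python) =====
-- def count_pos_chunk(train_data):
--     pos_chunk = {}
--     for sentence in train_data:
--         for w in sentence:
--             pos         = w['pos']
--             chunk       = w['chunk']
--             pos_dict    = pos_chunk.get(pos, {})
--             pos_dict[chunk] = pos_dict.get(chunk, 0) + 1
--             pos_chunk[pos] = pos_dict
--     return pos_chunk
-- ===== SOURCE B (Python) =====
-- def count_pos_chunk(train_data):
--     # Different algorithm: flatten everything into one list of (pos, chunk)
--     # pairs, take the distinct pairs in first-occurrence order, and for each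
--     # distinct pair count its occurrences in the flat list directly.
--     pairs = [(w['pos'], w['chunk']) for sentence in train_data for w in sentence]
--     result = {}
--     for key in dict.fromkeys(pairs):
--         result.setdefault(key[0], {})[key[1]] = pairs.count(key)
--     return result
-- ===== Notes on version B (the rewrite author's own statement) =====
-- stated objective: alternative
-- what changed: B replaces A's incremental per-word update of nested dicts by flatten-then-count: it flattens all words to one list of (pos, chunk) pairs, takes the distinct pairs in first-occurrence order, and computes each nested count by scanning the flat list with list.count.
import Mathlib
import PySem

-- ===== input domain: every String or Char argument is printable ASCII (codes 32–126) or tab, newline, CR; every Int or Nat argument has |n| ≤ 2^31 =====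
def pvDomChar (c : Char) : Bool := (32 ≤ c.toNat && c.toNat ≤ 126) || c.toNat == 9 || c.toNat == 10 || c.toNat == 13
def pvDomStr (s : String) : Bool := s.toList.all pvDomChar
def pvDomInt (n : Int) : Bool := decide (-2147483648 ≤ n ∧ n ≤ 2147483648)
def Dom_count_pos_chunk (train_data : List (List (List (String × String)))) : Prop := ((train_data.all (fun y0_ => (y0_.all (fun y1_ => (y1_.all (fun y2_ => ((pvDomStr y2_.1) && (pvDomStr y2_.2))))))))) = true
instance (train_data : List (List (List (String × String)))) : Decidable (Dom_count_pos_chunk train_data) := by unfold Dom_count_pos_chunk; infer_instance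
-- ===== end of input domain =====

-- B flattens all words to one list of (pos, chunk) pairs and computes each nested count by scanning
-- that flat list per distinct pair (flatten-then-count, same return value; neither program mutates its input).

-- ===== PORT A =====
-- w['pos'] on a word dict: first-match lookup in the association list (none = KeyError, excluded by Pre_)
def pvKeyGet (w : List (String × String)) (k : String) : Option String :=
  (PySem.Dict.mk w).get? k

def count_pos_chunk (train_data : List (List (List (String × String)))) : List (String × List (String × Int)) :=
  let pos_chunk : PySem.Dict String (PySem.Dict String Int) :=
    train_data.foldl (fun pos_chunk sentence =>
      sentence.foldl (fun pos_chunk w =>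
        match pvKeyGet w "pos", pvKeyGet w "chunk" with
        | some pos, some chunk =>
          let pos_dict := pos_chunk.getD pos PySem.Dict.empty
          let pos_dict := pos_dict.insert chunk (pos_dict.getD chunk 0 + 1)
          pos_chunk.insert pos pos_dict
        | _, _ => pos_chunk) pos_chunk) PySem.Dict.empty
  pos_chunk.items.map (fun pr => (pr.1, pr.2.items))

-- ===== PORT B =====
-- (w['pos'], w['chunk']) for one word; none = KeyError, excluded by Pre_ (the comprehension is exact under Pre_)
def pvPairOf (w : List (String × String)) : Option (String × String) :=
  match (PySem.Dict.mk w).get? "pos" with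
  | none => none
  | some pos =>
    match (PySem.Dict.mk w).get? "chunk" with
    | none => none
    | some chunk => some (pos, chunk)

def count_pos_chunk_alt (train_data : List (List (List (String × String)))) : List (String × List (String × Int)) :=
  let pairs : List (String × String) :=
    train_data.flatMap (fun sentence => sentence.filterMap pvPairOf)
  let result : PySem.Dict String (PySem.Dict String Int) :=
    (PySem.List.dedup pairs).foldl (fun result key =>
      -- result.setdefault(key[0], {})[key[1]] = pairs.count(key)
      result.modify key.1 PySem.Dict.empty
        (fun inner => inner.insert key.2 ((PySem.List.count pairs key : Nat) : Int))) PySem.Dict.empty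
  result.items.map (fun pr => (pr.1, pr.2.items))

-- ===== PRECONDITION & SPEC =====
-- Pre_ excludes exactly the words missing a 'pos' or 'chunk' key, on which Python A raises KeyError.
def Pre_count_pos_chunk (train_data : List (List (List (String × String)))) : Prop :=
  ∀ sentence ∈ train_data, ∀ w ∈ sentence, "pos" ∈ w.map Prod.fst ∧ "chunk" ∈ w.map Prod.fst
instance (train_data : List (List (List (String × String)))) : Decidable (Pre_count_pos_chunk train_data) := by unfold Pre_count_pos_chunk; infer_instance

def pvWitness_count_pos_chunk : (List (List (List (String × String)))) :=
  [[[("pos", "NN"), ("chunk", "B-NP")], [("pos", "NN"), ("chunk", "I-NP")]]]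

def Spec_count_pos_chunk (train_data : List (List (List (String × String)))) (out : List (String × List (String × Int))) : Prop := out = count_pos_chunk_alt train_data
instance (train_data : List (List (List (String × String)))) (out : List (String × List (String × Int))) : Decidable (Spec_count_pos_chunk train_data out) := by unfold Spec_count_pos_chunk; infer_instance

-- ===== CLAIM (what is proved, stated in full; the proofs are below) =====
def Claim_equal_count_pos_chunk : Prop := ∀ (train_data : List (List (List (String × String)))), Dom_count_pos_chunk train_data → Pre_count_pos_chunk train_data → Spec_count_pos_chunk train_data (count_pos_chunk train_data)


-- ===== LEMMAS AND PROOFS =====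

-- A's step on one (pos, chunk) pair
def pvBumpA (pc : PySem.Dict String (PySem.Dict String Int)) (x : String × String) :
    PySem.Dict String (PySem.Dict String Int) :=
  let I := pc.getD x.1 PySem.Dict.empty
  pc.insert x.1 (I.insert x.2 (I.getD x.2 0 + 1))

-- the counter's step on one (pos, chunk) pair
def pvBumpC (t : PySem.Dict (String × String) Int) (x : String × String) :
    PySem.Dict (String × String) Int :=
  t.insert x (t.getD x 0 + 1)

-- B's loop step on one (distinct pair, count) item
def pvStepR (r : PySem.Dict String (PySem.Dict String Int)) (kv : (String × String) × Int) :
    PySem.Dict String (PySem.Dict String Int) :=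
  r.modify kv.1.1 PySem.Dict.empty (fun inner => inner.insert kv.1.2 kv.2)

def pvReshape (t : PySem.Dict (String × String) Int) : PySem.Dict String (PySem.Dict String Int) :=
  t.items.foldl pvStepR PySem.Dict.empty

def pvPairs (train_data : List (List (List (String × String)))) : List (String × String) :=
  train_data.flatMap (fun sentence => sentence.filterMap pvPairOf)

-- A's word loop over one sentence is a fold of the pair step over the extracted pairs
theorem pv_sentence {sigma : Type} (step : sigma → (String × String) → sigma)
    (sent : List (List (String × String))) (s : sigma) :
    sent.foldl (fun acc w =>
      match pvKeyGet w "pos", pvKeyGet w "chunk" with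
      | some pos, some chunk => step acc (pos, chunk)
      | _, _ => acc) s
    = (sent.filterMap pvPairOf).foldl step s := by
  induction sent generalizing s with
  | nil => rfl
  | cons w sent ih =>
    simp only [List.foldl_cons, List.filterMap_cons]
    cases hp : pvKeyGet w "pos" <;> cases hc : pvKeyGet w "chunk" <;>
      simp only [pvPairOf, pvKeyGet] at hp hc ⊢ <;> simp only [hp, hc] <;> exact ih _

-- A's nested sentence/word loops are one fold over pvPairs
theorem pv_nested {sigma : Type} (step : sigma → (String × String) → sigma)
    (td : List (List (List (String × String)))) (s : sigma) :
    td.foldl (fun acc sentence => sentence.foldl (fun acc w =>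
      match pvKeyGet w "pos", pvKeyGet w "chunk" with
      | some pos, some chunk => step acc (pos, chunk)
      | _, _ => acc) acc) s
    = (pvPairs td).foldl step s := by
  unfold pvPairs
  induction td generalizing s with
  | nil => rfl
  | cons sent td ih =>
    simp only [List.foldl_cons, List.flatMap_cons, List.foldl_append]
    rw [pv_sentence step sent s]
    exact ih _

theorem pvA_eq (td : List (List (List (String × String)))) :
    count_pos_chunk td = ((pvPairs td).foldl pvBumpA PySem.Dict.empty).items.map (fun pr => (pr.1, pr.2.items)) :=
  congrArg (fun d : PySem.Dict String (PySem.Dict String Int) =>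
      d.items.map (fun pr : String × PySem.Dict String Int => (pr.1, pr.2.items)))
    (pv_nested pvBumpA td PySem.Dict.empty)

-- B's loop over the distinct pairs is exactly the reshape of Counter(pairs)'s items
theorem pvB_eq (td : List (List (List (String × String)))) :
    count_pos_chunk_alt td = (pvReshape ((pvPairs td).foldl pvBumpC PySem.Dict.empty)).items.map (fun pr => (pr.1, pr.2.items)) := by
  show ((PySem.List.dedup (pvPairs td)).foldl _ PySem.Dict.empty).items.map _ = _
  have hC : (pvPairs td).foldl pvBumpC PySem.Dict.empty = PySem.Dict.counter (pvPairs td) :=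
    PySem.Dict.foldl_insert_getD_add_one_eq_counter _
  rw [hC]
  unfold pvReshape
  rw [PySem.Dict.items_counter, List.foldl_map]
  simp only [PySem.List.dedup_eq_ofList, pvStepR, PySem.List.count_eq, pvPairs]

-- two inserts at different keys commute when the first key is already present (both are in-place)
theorem pv_insert_comm {kappa nu : Type} [BEq kappa] [LawfulBEq kappa]
    (d : PySem.Dict kappa nu) (k k' : kappa) (v w : nu)
    (hne : k ≠ k') (hk : d.contains k = true) :
    (d.insert k v).insert k' w = (d.insert k' w).insert k v := by
  have hk'k : (k' == k) = false := by simp [Ne.symm hne]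
  by_cases hc' : d.contains k' = true
  · have h1 : (d.insert k v).contains k' = true := by
      rw [PySem.Dict.contains_insert]; simp [hc']
    have h2 : (d.insert k' w).contains k = true := by
      rw [PySem.Dict.contains_insert]; simp [hk]
    apply PySem.Dict.ext
    rw [PySem.Dict.items_insert_of_contains _ _ h1, PySem.Dict.items_insert_of_contains _ _ hk,
        PySem.Dict.items_insert_of_contains _ _ h2, PySem.Dict.items_insert_of_contains _ _ hc']
    simp only [List.map_map]
    apply List.map_congr_left
    intro q _
    by_cases hq : q.1 = k <;> by_cases hq' : q.1 = k' <;>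
      simp_all [Function.comp]
  · have hc'f : d.contains k' = false := by simpa using hc'
    have h1 : (d.insert k v).contains k' = false := by
      rw [PySem.Dict.contains_insert, hk'k, hc'f]; rfl
    have h2 : (d.insert k' w).contains k = true := by
      rw [PySem.Dict.contains_insert]; simp [hk]
    apply PySem.Dict.ext
    rw [PySem.Dict.items_insert_of_not_contains _ _ h1, PySem.Dict.items_insert_of_contains _ _ hk,
        PySem.Dict.items_insert_of_contains _ _ h2, PySem.Dict.items_insert_of_not_contains _ _ hc'f]
    simp [List.map_append, hk'k]

theorem pv_stepR_succ (r : PySem.Dict String (PySem.Dict String Int)) (p c : String) (n : Int) :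
    pvStepR r ((p, c), n + 1) = pvBumpA (pvStepR r ((p, c), n)) (p, c) := by
  simp only [pvStepR, pvBumpA, PySem.Dict.modify]
  rw [PySem.Dict.getD_insert_self, PySem.Dict.getD_insert_self,
      PySem.Dict.insert_insert_self, PySem.Dict.insert_insert_self]

theorem pv_contains_of_inner {r : PySem.Dict String (PySem.Dict String Int)} {p c : String}
    (h : (r.getD p PySem.Dict.empty).contains c = true) : r.contains p = true := by
  by_cases hp : r.contains p = true
  · exact hp
  · have hpf : r.contains p = false := by simpa using hp
    rw [PySem.Dict.getD_of_not_contains _ _ hpf] at h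
    simp [PySem.Dict.contains_empty] at h

-- one reshape step at a key other than (p, c) commutes with A's bump at (p, c)
theorem pv_step_comm (r : PySem.Dict String (PySem.Dict String Int)) (p c : String)
    (kv : (String × String) × Int) (hne : kv.1 ≠ (p, c))
    (hin : (r.getD p PySem.Dict.empty).contains c = true) :
    pvStepR (pvBumpA r (p, c)) kv = pvBumpA (pvStepR r kv) (p, c) := by
  obtain ⟨⟨q, e⟩, m⟩ := kv
  simp only [pvStepR, pvBumpA, PySem.Dict.modify]
  by_cases hq : q = p
  · subst hq
    have hec : e ≠ c := fun h => hne (by simp [h])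
    rw [PySem.Dict.getD_insert_self, PySem.Dict.getD_insert_self,
        PySem.Dict.insert_insert_self, PySem.Dict.insert_insert_self,
        PySem.Dict.getD_insert_of_ne _ _ _ (Ne.symm hec),
        pv_insert_comm _ c e _ _ (Ne.symm hec) hin]
  · rw [PySem.Dict.getD_insert_of_ne _ _ _ hq,
        PySem.Dict.getD_insert_of_ne _ _ _ (Ne.symm hq)]
    exact pv_insert_comm r p q _ _ (Ne.symm hq) (pv_contains_of_inner hin)

theorem pv_inner_contains_stepR (r : PySem.Dict String (PySem.Dict String Int)) (p c : String)
    (kv : (String × String) × Int) (hin : (r.getD p PySem.Dict.empty).contains c = true) :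
    ((pvStepR r kv).getD p PySem.Dict.empty).contains c = true := by
  obtain ⟨⟨q, e⟩, m⟩ := kv
  simp only [pvStepR, PySem.Dict.modify]
  by_cases hq : q = p
  · subst hq
    rw [PySem.Dict.getD_insert_self, PySem.Dict.contains_insert]
    simp [hin]
  · rw [PySem.Dict.getD_insert_of_ne _ _ _ (Ne.symm hq)]
    exact hin

theorem pv_fold_comm (L : List ((String × String) × Int)) (p c : String) :
    ∀ r : PySem.Dict String (PySem.Dict String Int), (p, c) ∉ L.map (·.1) →
    (r.getD p PySem.Dict.empty).contains c = true →
    L.foldl pvStepR (pvBumpA r (p, c)) = pvBumpA (L.foldl pvStepR r) (p, c) := by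
  induction L with
  | nil => intro r _ _; rfl
  | cons kv L ih =>
    intro r hnm hin
    simp only [List.map_cons, List.mem_cons, not_or] at hnm
    simp only [List.foldl_cons]
    rw [pv_step_comm r p c kv (fun h => hnm.1 h.symm) hin]
    exact ih _ hnm.2 (pv_inner_contains_stepR r p c kv hin)

theorem pv_fold_map (L : List ((String × String) × Int)) (p c : String) (n : Int) :
    ∀ r : PySem.Dict String (PySem.Dict String Int), (L.map (·.1)).Nodup → ((p, c), n) ∈ L →
    (L.map (fun q => if q.1 == (p, c) then ((p, c), n + 1) else q)).foldl pvStepR r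
      = pvBumpA (L.foldl pvStepR r) (p, c) := by
  induction L with
  | nil => intro r _ hm; simp at hm
  | cons kv L ih =>
    intro r hnd hm
    simp only [List.map_cons, List.nodup_cons] at hnd
    simp only [List.map_cons, List.foldl_cons]
    by_cases hk : kv.1 = (p, c)
    · have hnotin : (p, c) ∉ L.map (·.1) := hk ▸ hnd.1
      have hkv : kv = ((p, c), n) := by
        rcases List.mem_cons.mp hm with h | h
        · exact h.symm
        · exact absurd (by exact List.mem_map_of_mem h) hnotin
      subst hkv
      have hmap : L.map (fun q => if q.1 == ((p, c) : String × String) then ((p, c), n + 1) else q) = L := by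
        have hq : ∀ q ∈ L, (if q.1 == ((p, c) : String × String) then ((p, c), n + 1) else q) = q := by
          intro q hq
          have hqn : q.1 ≠ (p, c) := fun h => hnotin (by rw [← h]; exact List.mem_map_of_mem hq)
          simp [hqn]
        rw [List.map_congr_left hq, List.map_id']
      rw [hmap]
      simp only [beq_self_eq_true, if_true]
      rw [pv_stepR_succ]
      refine pv_fold_comm L p c _ hnotin ?_
      simp only [pvStepR, PySem.Dict.modify]
      rw [PySem.Dict.getD_insert_self]
      exact PySem.Dict.contains_insert_self _ _ _
    · have hkb : (kv.1 == ((p, c) : String × String)) = false := by simp [hk]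
      simp only [hkb, Bool.false_eq_true, if_false]
      have hm' : ((p, c), n) ∈ L := by
        rcases List.mem_cons.mp hm with h | h
        · exact absurd (congrArg Prod.fst h.symm) hk
        · exact h
      exact ih _ hnd.2 hm'

theorem pv_inner_zero (L : List ((String × String) × Int)) (p c : String) :
    ∀ r : PySem.Dict String (PySem.Dict String Int), (p, c) ∉ L.map (·.1) →
    ((r.getD p PySem.Dict.empty).getD c 0 = 0) →
    (((L.foldl pvStepR r).getD p PySem.Dict.empty).getD c 0 = 0) := by
  induction L with
  | nil => intro r _ h; exact h
  | cons kv L ih =>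
    intro r hnm h0
    simp only [List.map_cons, List.mem_cons, not_or] at hnm
    simp only [List.foldl_cons]
    refine ih _ hnm.2 ?_
    obtain ⟨⟨q, e⟩, m⟩ := kv
    simp only [pvStepR, PySem.Dict.modify]
    by_cases hq : q = p
    · subst hq
      have hec : e ≠ c := fun h => hnm.1 (by simp [h])
      rw [PySem.Dict.getD_insert_self, PySem.Dict.getD_insert_of_ne _ _ _ (Ne.symm hec)]
      exact h0
    · rw [PySem.Dict.getD_insert_of_ne _ _ _ (Ne.symm hq)]
      exact h0

-- the key step: reshaping after one tally bump is A's bump after reshaping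
theorem pv_key (t : PySem.Dict (String × String) Int) (p c : String) (hnd : t.keys.Nodup) :
    pvReshape (pvBumpC t (p, c)) = pvBumpA (pvReshape t) (p, c) := by
  by_cases hc : t.contains (p, c) = true
  · have h1 := PySem.Dict.contains_eq_isSome_get? t ((p, c) : String × String)
    rw [hc] at h1
    obtain ⟨n, hn⟩ := Option.isSome_iff_exists.mp h1.symm
    have hget : t.getD (p, c) 0 = n := PySem.Dict.getD_of_get?_eq_some _ _ hn
    simp only [pvReshape, pvBumpC]
    rw [PySem.Dict.items_insert_of_contains _ _ hc, hget]
    have hnd' : (t.items.map (·.1)).Nodup := by simpa [PySem.Dict.keys] using hnd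
    exact pv_fold_map t.items p c n _ hnd' (PySem.Dict.mem_items_of_get?_eq_some _ hn)
  · have hcf : t.contains (p, c) = false := by simpa using hc
    simp only [pvReshape, pvBumpC]
    rw [PySem.Dict.items_insert_of_not_contains _ _ hcf,
        PySem.Dict.getD_of_not_contains _ _ hcf, List.foldl_append]
    simp only [List.foldl_cons, List.foldl_nil]
    have hnm : (p, c) ∉ t.items.map (·.1) := by
      intro hmem
      have hmem' : ((p, c) : String × String) ∈ t.keys := by
        simpa [PySem.Dict.keys] using hmem
      rw [(PySem.Dict.contains_iff_mem_keys t _).mpr hmem'] at hcf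
      exact absurd hcf (by simp)
    have hz := pv_inner_zero t.items p c PySem.Dict.empty hnm (by simp [PySem.Dict.getD_empty])
    simp only [pvStepR, pvBumpA, PySem.Dict.modify]
    rw [hz]

theorem pv_main (P : List (String × String)) :
    pvReshape (P.foldl pvBumpC PySem.Dict.empty) = P.foldl pvBumpA PySem.Dict.empty := by
  induction P using List.reverseRecOn with
  | nil => rfl
  | append_singleton P x ih =>
    have hnd : (P.foldl pvBumpC PySem.Dict.empty).keys.Nodup :=
      PySem.Dict.nodup_keys_foldl_insert P (fun d x => d.getD x 0 + 1) PySem.Dict.empty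
        PySem.Dict.nodup_keys_empty
    obtain ⟨p, ch⟩ := x
    rw [List.foldl_append, List.foldl_append]
    simp only [List.foldl_cons, List.foldl_nil]
    rw [pv_key _ p ch hnd, ih]

-- ===== VERDICT (by name: the statement is the Claim_ definition above) =====
theorem count_pos_chunk_spec : Claim_equal_count_pos_chunk := by
  intro td _ _
  show count_pos_chunk td = count_pos_chunk_alt td
  rw [pvA_eq, pvB_eq, pv_main]
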